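-- pv_equiv track=rewrite | github.com/h1r9do/Network-Dashboard | Main/nightly_inventory_web_format_update.py | assign_site_from_ip
-- ===== SOURCE A (Python) =====
-- def assign_site_from_ip(ip_address, hostname=''):
--     """Assign site based on IP address ranges"""
--     if not ip_address:
--         # Fallback to hostname patterns if no IP
--         hostname_lower = hostname.lower() if hostname else ''
--         if any(x in hostname_lower for x in ['seattle', 'sea-']):
--             return 'Equinix-Seattle'
--         elif any(x in hostname_lower for x in ['alameda', 'ala-']):
--             return 'AZ-Alameda-DC'
--         elif any(x in hostname_lower for x in ['atl', 'atlanta']):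
--             return 'Focal-Point-ATL'
--         elif any(x in hostname_lower for x in ['dal', 'dallas']):
--             return 'Focal-Point-DAL'
--         else:
--             return 'AZ-Scottsdale-HQ-Corp'
--
--     # IP-based assignment (correct schema)
--     if ip_address.startswith('10.0.') or ip_address.startswith('172.16.'):
--         return 'AZ-Scottsdale-HQ-Corp'
--     elif ip_address.startswith('10.101.'):
--         return 'AZ-Alameda-DC'
--     elif ip_address.startswith('10.41.'):
--         return 'AZ-Desert-Ridge'
--     elif ip_address.startswith('10.42.'):
--         return 'Focal-Point-DAL'
--     elif ip_address.startswith('10.43.'):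
--         return 'Focal-Point-ATL'
--     elif ip_address.startswith('10.44.'):
--         return 'Equinix-Seattle'
--     elif ip_address.startswith('192.168.'):
--         # 192.168 appears in both Alameda and Scottsdale - use hostname as tiebreaker
--         hostname_lower = hostname.lower() if hostname else ''
--         if 'ala' in hostname_lower or 'alameda' in hostname_lower:
--             return 'AZ-Alameda-DC'
--         else:
--             return 'AZ-Scottsdale-HQ-Corp'
--     else:
--         # Default fallback
--         return 'AZ-Scottsdale-HQ-Corp'
-- ===== SOURCE B (Python) =====
-- _SITE_BY_PREFIX = {
--     '10.0.': 'AZ-Scottsdale-HQ-Corp',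
--     '10.41.': 'AZ-Desert-Ridge',
--     '10.42.': 'Focal-Point-DAL',
--     '10.43.': 'Focal-Point-ATL',
--     '10.44.': 'Equinix-Seattle',
--     '10.101.': 'AZ-Alameda-DC',
--     '172.16.': 'AZ-Scottsdale-HQ-Corp',
-- }
--
-- _HOST_RULES = (
--     (('seattle', 'sea-'), 'Equinix-Seattle'),
--     (('alameda', 'ala-'), 'AZ-Alameda-DC'),
--     (('atl',), 'Focal-Point-ATL'),   # 'atlanta' always contains 'atl'
--     (('dal',), 'Focal-Point-DAL'),   # 'dallas' always contains 'dal'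
-- )
--
-- def assign_site_from_ip(ip_address, hostname=''):
--     """Assign site from IP: hash lookup on the length-5/6/7 slice of the IP
--     instead of a chain of startswith tests (prefixes are mutually exclusive,
--     so one dict probe per candidate length decides the site)."""
--     hostname_lower = hostname.lower()
--     if not ip_address:
--         return next((site for pats, site in _HOST_RULES
--                      if any(p in hostname_lower for p in pats)),
--                     'AZ-Scottsdale-HQ-Corp')
--     if ip_address[:8] == '192.168.':
--         # 192.168 appears in both Alameda and Scottsdale - hostname tiebreaker
--         return 'AZ-Alameda-DC' if 'ala' in hostname_lower else 'AZ-Scottsdale-HQ-Corp'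
--     for n in (5, 6, 7):
--         site = _SITE_BY_PREFIX.get(ip_address[:n])
--         if site is not None:
--             return site
--     return 'AZ-Scottsdale-HQ-Corp'
-- ===== Notes on version B (the rewrite author's own statement) =====
-- stated objective: alternative
-- what changed: The startswith if/elif chain is replaced by a dict keyed by the whole prefix, probed once per candidate prefix length (5, 6, 7) with an ip slice (the prefixes are mutually exclusive so order drops out); the 192.168. case becomes a single length-8 slice-equality pre-check with its tiebreaker reduced to the shortest substring test, and the hostname fallback becomes a first-match scan over rules whose redundant longer patterns (each containing a kept shorter one) are dropped.
import Mathlib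
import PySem

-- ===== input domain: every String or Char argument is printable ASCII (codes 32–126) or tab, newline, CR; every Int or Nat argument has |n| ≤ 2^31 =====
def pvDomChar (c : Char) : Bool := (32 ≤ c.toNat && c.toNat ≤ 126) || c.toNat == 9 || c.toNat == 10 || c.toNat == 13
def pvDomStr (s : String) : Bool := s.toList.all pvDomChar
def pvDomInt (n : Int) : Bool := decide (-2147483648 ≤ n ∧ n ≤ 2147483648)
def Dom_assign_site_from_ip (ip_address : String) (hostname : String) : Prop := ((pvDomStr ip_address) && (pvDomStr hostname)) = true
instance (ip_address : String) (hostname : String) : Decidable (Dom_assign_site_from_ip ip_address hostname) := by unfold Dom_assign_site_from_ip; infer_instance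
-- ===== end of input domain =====

-- B replaces the startswith if/elif chain by one dict probe per candidate prefix
-- length (slices ip[:5], ip[:6], ip[:7]) and drops the redundant substring
-- patterns in the hostname fallback (alternative decomposition, same cost).

-- ===== PORT A =====
def assign_site_from_ip (ip_address : String) (hostname : String) : String :=
  if ip_address == "" then
    let hostname_lower := if hostname != "" then PySem.Str.lower hostname else ""
    if ["seattle", "sea-"].any (fun x => PySem.Str.isIn x hostname_lower) then
      "Equinix-Seattle"
    else if ["alameda", "ala-"].any (fun x => PySem.Str.isIn x hostname_lower) then
      "AZ-Alameda-DC"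
    else if ["atl", "atlanta"].any (fun x => PySem.Str.isIn x hostname_lower) then
      "Focal-Point-ATL"
    else if ["dal", "dallas"].any (fun x => PySem.Str.isIn x hostname_lower) then
      "Focal-Point-DAL"
    else
      "AZ-Scottsdale-HQ-Corp"
  else if PySem.Str.startswith ip_address "10.0." || PySem.Str.startswith ip_address "172.16." then
    "AZ-Scottsdale-HQ-Corp"
  else if PySem.Str.startswith ip_address "10.101." then
    "AZ-Alameda-DC"
  else if PySem.Str.startswith ip_address "10.41." then
    "AZ-Desert-Ridge"
  else if PySem.Str.startswith ip_address "10.42." then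
    "Focal-Point-DAL"
  else if PySem.Str.startswith ip_address "10.43." then
    "Focal-Point-ATL"
  else if PySem.Str.startswith ip_address "10.44." then
    "Equinix-Seattle"
  else if PySem.Str.startswith ip_address "192.168." then
    let hostname_lower := if hostname != "" then PySem.Str.lower hostname else ""
    if PySem.Str.isIn "ala" hostname_lower || PySem.Str.isIn "alameda" hostname_lower then
      "AZ-Alameda-DC"
    else
      "AZ-Scottsdale-HQ-Corp"
  else
    "AZ-Scottsdale-HQ-Corp"

-- ===== PORT B =====
def pvSiteByPrefix : PySem.Dict String String :=
  PySem.Dict.mk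
    [("10.0.", "AZ-Scottsdale-HQ-Corp"),
     ("10.41.", "AZ-Desert-Ridge"),
     ("10.42.", "Focal-Point-DAL"),
     ("10.43.", "Focal-Point-ATL"),
     ("10.44.", "Equinix-Seattle"),
     ("10.101.", "AZ-Alameda-DC"),
     ("172.16.", "AZ-Scottsdale-HQ-Corp")]

def pvHostRules : List (List String × String) :=
  [(["seattle", "sea-"], "Equinix-Seattle"),
   (["alameda", "ala-"], "AZ-Alameda-DC"),
   (["atl"], "Focal-Point-ATL"),
   (["dal"], "Focal-Point-DAL")]

-- next((site for pats, site in rules if any(p in hl for p in pats)), default)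
def pvHostNext (hl : String) : List (List String × String) → String
  | [] => "AZ-Scottsdale-HQ-Corp"
  | (pats, site) :: rest =>
      if pats.any (fun p => PySem.Str.isIn p hl) then site else pvHostNext hl rest

-- for n in (5, 6, 7): site = _SITE_BY_PREFIX.get(ip[:n]); if site is not None: return site
def pvPrefixLoop (ip : String) : List Int → Option String
  | [] => none
  | n :: ns =>
      match pvSiteByPrefix.get? (PySem.Str.slice ip none (some n)) with
      | some site => some site
      | none => pvPrefixLoop ip ns

def assign_site_from_ip_alt (ip_address : String) (hostname : String) : String :=
  let hostname_lower := PySem.Str.lower hostname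
  if ip_address == "" then
    pvHostNext hostname_lower pvHostRules
  else if PySem.Str.slice ip_address none (some 8) == "192.168." then
    if PySem.Str.isIn "ala" hostname_lower then "AZ-Alameda-DC" else "AZ-Scottsdale-HQ-Corp"
  else
    match pvPrefixLoop ip_address [5, 6, 7] with
    | some site => site
    | none => "AZ-Scottsdale-HQ-Corp"

-- ===== PRECONDITION & SPEC =====
def Spec_assign_site_from_ip (ip_address : String) (hostname : String) (out : String) : Prop := out = assign_site_from_ip_alt ip_address hostname
instance (ip_address : String) (hostname : String) (out : String) : Decidable (Spec_assign_site_from_ip ip_address hostname out) := by unfold Spec_assign_site_from_ip; infer_instance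

-- ===== CLAIM (what is proved, stated in full; the proofs are below) =====
def Claim_equal_assign_site_from_ip : Prop := ∀ (ip_address : String) (hostname : String), Dom_assign_site_from_ip ip_address hostname → Spec_assign_site_from_ip ip_address hostname (assign_site_from_ip ip_address hostname)

-- ===== LEMMAS AND PROOFS =====

-- hostname.lower() if hostname else '' equals hostname.lower() (empty lowers to empty)
theorem pv_lower_empty (hostname : String) :
    (if hostname != "" then PySem.Str.lower hostname else "") = PySem.Str.lower hostname := by
  by_cases h : hostname = "" <;> simp [h]
  rfl

-- a positive startswith pins the slice ip[:p.length] to p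
theorem pv_slice_of_prefix (ip p : String) (n : Int) (hn : 0 ≤ n) (hl : p.toList.length = n.toNat)
    (h : PySem.Str.startswith ip p = true) :
    PySem.Str.slice ip none (some n) = p := by
  rw [PySem.Str.slice]
  simp only [PySem.Chars.slice_eq_listSlice, PySem.List.slice_to _ hn]
  rw [PySem.Str.startswith, PySem.Chars.startswith_iff, List.prefix_iff_eq_take] at h
  rw [← hl, ← h]
  exact String.ofList_toList

-- a slice ip[:n] equal to p forces ip.startswith(p)
theorem pv_prefix_of_slice (ip p : String) (n : Int) (hn : 0 ≤ n)
    (h : PySem.Str.slice ip none (some n) = p) :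
    PySem.Str.startswith ip p = true := by
  rw [PySem.Str.slice] at h
  simp only [PySem.Chars.slice_eq_listSlice, PySem.List.slice_to _ hn] at h
  rw [PySem.Str.startswith, PySem.Chars.startswith_iff]
  have ht : ip.toList.take n.toNat = p.toList := by rw [← h]; simp
  exact ht ▸ List.take_prefix n.toNat ip.toList

-- startswith is monotone down prefixes of the pattern
theorem pv_sw_trans (ip p q : String) (hpq : p.toList <+: q.toList)
    (h : PySem.Str.startswith ip q = true) : PySem.Str.startswith ip p = true := by
  rw [PySem.Str.startswith, PySem.Chars.startswith_iff] at *
  exact hpq.trans h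

-- two prefix-incomparable patterns cannot both match
theorem pv_excl (ip p q : String) (hne : ¬ (p.toList <+: q.toList) ∧ ¬ (q.toList <+: p.toList))
    (hp : PySem.Str.startswith ip p = true) (hq : PySem.Str.startswith ip q = true) : False := by
  rw [PySem.Str.startswith, PySem.Chars.startswith_iff] at hp hq
  rcases List.prefix_or_prefix_of_prefix hp hq with h | h
  exacts [hne.1 h, hne.2 h]

-- a failed startswith refutes a dict-key comparison with the slice
theorem pv_key_ne (ip p : String) (n : Int) (hn : 0 ≤ n)
    (h : PySem.Str.startswith ip p = false) :
    (p == PySem.Str.slice ip none (some n)) = false := by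
  cases heq : (p == PySem.Str.slice ip none (some n)) with
  | false => rfl
  | true =>
    exfalso
    have := pv_prefix_of_slice ip p n hn (eq_of_beq heq).symm
    rw [h] at this
    exact Bool.false_ne_true this

-- same, for the slice-on-the-left comparison B makes for 192.168.
theorem pv_key_ne' (ip p : String) (n : Int) (hn : 0 ≤ n)
    (h : PySem.Str.startswith ip p = false) :
    (PySem.Str.slice ip none (some n) == p) = false := by
  cases heq : (PySem.Str.slice ip none (some n) == p) with
  | false => rfl
  | true =>
    exfalso
    have := pv_prefix_of_slice ip p n hn (eq_of_beq heq)
    rw [h] at this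
    exact Bool.false_ne_true this

-- a match of any other prefix rules out the 192.168. slice test
theorem pv_not192 (ip p : String)
    (hne : ¬ (p.toList <+: "192.168.".toList) ∧ ¬ ("192.168.".toList <+: p.toList))
    (hp : PySem.Str.startswith ip p = true) :
    (PySem.Str.slice ip none (some 8) == "192.168.") = false := by
  cases heq : (PySem.Str.slice ip none (some 8) == "192.168.") with
  | false => rfl
  | true =>
    exfalso
    exact pv_excl ip p "192.168." hne hp
      (pv_prefix_of_slice ip "192.168." 8 (by norm_num) (eq_of_beq heq))

-- 'sub in h or sup in h' collapses to 'sub in h' when sub is inside sup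
theorem pv_absorb (sub sup h : String) (hs : sub.toList <:+: sup.toList) :
    (PySem.Str.isIn sub h || PySem.Str.isIn sup h) = PySem.Str.isIn sub h := by
  cases hsub : PySem.Str.isIn sub h with
  | true => simp
  | false =>
    simp only [Bool.false_or]
    cases hsup : PySem.Str.isIn sup h with
    | false => rfl
    | true =>
      exfalso
      rw [PySem.Str.isIn_iff_infix] at hsup
      have h2 : PySem.Str.isIn sub h = true :=
        (PySem.Str.isIn_iff_infix sub h).mpr (hs.trans hsup)
      rw [hsub] at h2
      exact Bool.false_ne_true h2

theorem assign_site_from_ip_spec : Claim_equal_assign_site_from_ip := by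
  intro ip hn _
  unfold Spec_assign_site_from_ip assign_site_from_ip assign_site_from_ip_alt
  simp only [pv_lower_empty]
  by_cases hip : ip = ""
  · subst hip
    simp only [beq_self_eq_true, if_true, pvHostNext, pvHostRules, List.any_cons, List.any_nil,
      Bool.or_false,
      pv_absorb "atl" "atlanta" (PySem.Str.lower hn) (by decide),
      pv_absorb "dal" "dallas" (PySem.Str.lower hn) (by decide)]
  · have hipb : (ip == "") = false := by simp [hip]
    simp only [hipb, Bool.false_eq_true, if_false]
    by_cases hA1 : (PySem.Str.startswith ip "10.0." || PySem.Str.startswith ip "172.16.") = true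
    · rcases Bool.or_eq_true_iff.mp hA1 with h | h
      · have hs5 := pv_slice_of_prefix ip "10.0." 5 (by norm_num) (by decide) h
        simp only [hA1, if_true, pv_not192 ip "10.0." (by decide) h, Bool.false_eq_true, if_false,
          pvPrefixLoop, hs5]
        rfl
      · have hs5 := pv_slice_of_prefix ip "172.1" 5 (by norm_num) (by decide)
          (pv_sw_trans ip "172.1" "172.16." (by decide) h)
        have hs6 := pv_slice_of_prefix ip "172.16" 6 (by norm_num) (by decide)
          (pv_sw_trans ip "172.16" "172.16." (by decide) h)
        have hs7 := pv_slice_of_prefix ip "172.16." 7 (by norm_num) (by decide) h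
        simp only [hA1, if_true, pv_not192 ip "172.16." (by decide) h, Bool.false_eq_true, if_false,
          pvPrefixLoop, hs5, hs6, hs7]
        rfl
    · rw [Bool.not_eq_true, Bool.or_eq_false_iff] at hA1
      obtain ⟨h10, h17⟩ := hA1
      simp only [h10, h17, Bool.or_false, Bool.false_eq_true, if_false]
      by_cases h101 : PySem.Str.startswith ip "10.101." = true
      · have hs5 := pv_slice_of_prefix ip "10.10" 5 (by norm_num) (by decide)
          (pv_sw_trans ip "10.10" "10.101." (by decide) h101)
        have hs6 := pv_slice_of_prefix ip "10.101" 6 (by norm_num) (by decide)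
          (pv_sw_trans ip "10.101" "10.101." (by decide) h101)
        have hs7 := pv_slice_of_prefix ip "10.101." 7 (by norm_num) (by decide) h101
        simp only [h101, if_true, pv_not192 ip "10.101." (by decide) h101, Bool.false_eq_true,
          if_false, pvPrefixLoop, hs5, hs6, hs7]
        rfl
      · rw [Bool.not_eq_true] at h101
        simp only [h101, Bool.false_eq_true, if_false]
        by_cases h41 : PySem.Str.startswith ip "10.41." = true
        · have hs5 := pv_slice_of_prefix ip "10.41" 5 (by norm_num) (by decide)
            (pv_sw_trans ip "10.41" "10.41." (by decide) h41)
          have hs6 := pv_slice_of_prefix ip "10.41." 6 (by norm_num) (by decide) h41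
          simp only [h41, if_true, pv_not192 ip "10.41." (by decide) h41, Bool.false_eq_true,
            if_false, pvPrefixLoop, hs5, hs6]
          rfl
        · rw [Bool.not_eq_true] at h41
          simp only [h41, Bool.false_eq_true, if_false]
          by_cases h42 : PySem.Str.startswith ip "10.42." = true
          · have hs5 := pv_slice_of_prefix ip "10.42" 5 (by norm_num) (by decide)
              (pv_sw_trans ip "10.42" "10.42." (by decide) h42)
            have hs6 := pv_slice_of_prefix ip "10.42." 6 (by norm_num) (by decide) h42
            simp only [h42, if_true, pv_not192 ip "10.42." (by decide) h42, Bool.false_eq_true,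
              if_false, pvPrefixLoop, hs5, hs6]
            rfl
          · rw [Bool.not_eq_true] at h42
            simp only [h42, Bool.false_eq_true, if_false]
            by_cases h43 : PySem.Str.startswith ip "10.43." = true
            · have hs5 := pv_slice_of_prefix ip "10.43" 5 (by norm_num) (by decide)
                (pv_sw_trans ip "10.43" "10.43." (by decide) h43)
              have hs6 := pv_slice_of_prefix ip "10.43." 6 (by norm_num) (by decide) h43
              simp only [h43, if_true, pv_not192 ip "10.43." (by decide) h43, Bool.false_eq_true,
                if_false, pvPrefixLoop, hs5, hs6]
              rfl
            · rw [Bool.not_eq_true] at h43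
              simp only [h43, Bool.false_eq_true, if_false]
              by_cases h44 : PySem.Str.startswith ip "10.44." = true
              · have hs5 := pv_slice_of_prefix ip "10.44" 5 (by norm_num) (by decide)
                  (pv_sw_trans ip "10.44" "10.44." (by decide) h44)
                have hs6 := pv_slice_of_prefix ip "10.44." 6 (by norm_num) (by decide) h44
                simp only [h44, if_true, pv_not192 ip "10.44." (by decide) h44, Bool.false_eq_true,
                  if_false, pvPrefixLoop, hs5, hs6]
                rfl
              · rw [Bool.not_eq_true] at h44
                simp only [h44, Bool.false_eq_true, if_false]
                by_cases h192 : PySem.Str.startswith ip "192.168." = true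
                · have hs8 : PySem.Str.slice ip none (some 8) = "192.168." :=
                    pv_slice_of_prefix ip "192.168." 8 (by norm_num) (by decide) h192
                  simp only [h192, if_true, hs8, beq_self_eq_true,
                    pv_absorb "ala" "alameda" (PySem.Str.lower hn) (by decide)]
                · rw [Bool.not_eq_true] at h192
                  simp only [h192, Bool.false_eq_true, if_false,
                    pv_key_ne' ip "192.168." 8 (by norm_num) h192,
                    pvPrefixLoop, pvSiteByPrefix, PySem.Dict.get?_mk_cons,
                    pv_key_ne ip "10.0." 5 (by norm_num) h10,
                    pv_key_ne ip "10.0." 6 (by norm_num) h10,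
                    pv_key_ne ip "10.0." 7 (by norm_num) h10,
                    pv_key_ne ip "10.41." 5 (by norm_num) h41,
                    pv_key_ne ip "10.41." 6 (by norm_num) h41,
                    pv_key_ne ip "10.41." 7 (by norm_num) h41,
                    pv_key_ne ip "10.42." 5 (by norm_num) h42,
                    pv_key_ne ip "10.42." 6 (by norm_num) h42,
                    pv_key_ne ip "10.42." 7 (by norm_num) h42,
                    pv_key_ne ip "10.43." 5 (by norm_num) h43,
                    pv_key_ne ip "10.43." 6 (by norm_num) h43,
                    pv_key_ne ip "10.43." 7 (by norm_num) h43,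
                    pv_key_ne ip "10.44." 5 (by norm_num) h44,
                    pv_key_ne ip "10.44." 6 (by norm_num) h44,
                    pv_key_ne ip "10.44." 7 (by norm_num) h44,
                    pv_key_ne ip "10.101." 5 (by norm_num) h101,
                    pv_key_ne ip "10.101." 6 (by norm_num) h101,
                    pv_key_ne ip "10.101." 7 (by norm_num) h101,
                    pv_key_ne ip "172.16." 5 (by norm_num) h17,
                    pv_key_ne ip "172.16." 6 (by norm_num) h17,
                    pv_key_ne ip "172.16." 7 (by norm_num) h17]
                  rfl
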